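-- pv_equiv track=rewrite | github.com/Rinesamerovci/InsightClips | backend/app/services/analysis_service.py | _resolve_sentiment
-- ===== SOURCE A (Python) =====
-- POSITIVE_TERMS = {
--     "amazing", "authentic", "best", "boost", "breakthrough", "epic", "exciting", "free",
--     "genius", "great", "growth", "huge", "impressive", "incredible", "love", "massive",
--     "powerful", "smart", "success", "viral", "win", "wow",
-- }
--
-- NEGATIVE_TERMS = {
--     "angry", "awful", "bad", "boring", "broken", "crisis", "difficult", "fail", "hate",
--     "hard", "mistake", "pain", "problem", "regret", "risk", "sad", "scared", "stuck",
--     "terrible", "wrong",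
-- }
--
-- def _resolve_sentiment(terms: list[str]) -> str:
--     positive_hits = sum(1 for term in terms if term in POSITIVE_TERMS)
--     negative_hits = sum(1 for term in terms if term in NEGATIVE_TERMS)
--     if positive_hits > negative_hits:
--         return "positive"
--     if negative_hits > positive_hits:
--         return "negative"
--     return "neutral"
-- ===== SOURCE B (Python) =====
-- POSITIVE_TERMS = {
--     "amazing", "authentic", "best", "boost", "breakthrough", "epic", "exciting", "free",
--     "genius", "great", "growth", "huge", "impressive", "incredible", "love", "massive",
--     "powerful", "smart", "success", "viral", "win", "wow",
-- }
--
-- NEGATIVE_TERMS = {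
--     "angry", "awful", "bad", "boring", "broken", "crisis", "difficult", "fail", "hate",
--     "hard", "mistake", "pain", "problem", "regret", "risk", "sad", "scared", "stuck",
--     "terrible", "wrong",
-- }
--
-- def _resolve_sentiment(terms: list[str]) -> str:
--     # One pass over the input building a frequency table, then loop over the
--     # fixed vocabularies indexing into it (instead of scanning the input twice).
--     counts = {}
--     for term in terms:
--         counts[term] = counts.get(term, 0) + 1
--     positive_hits = sum(counts.get(t, 0) for t in POSITIVE_TERMS)
--     negative_hits = sum(counts.get(t, 0) for t in NEGATIVE_TERMS)
--     if positive_hits > negative_hits: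
--         return "positive"
--     if negative_hits > positive_hits:
--         return "negative"
--     return "neutral"
-- ===== Notes on version B (the rewrite author's own statement) =====
-- stated objective: alternative
-- what changed: B builds a frequency table in one pass over the input and then sums lookups while iterating over the two fixed vocabularies, instead of scanning the input list twice with set-membership tests; the final three-way comparison is unchanged.
import Mathlib
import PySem

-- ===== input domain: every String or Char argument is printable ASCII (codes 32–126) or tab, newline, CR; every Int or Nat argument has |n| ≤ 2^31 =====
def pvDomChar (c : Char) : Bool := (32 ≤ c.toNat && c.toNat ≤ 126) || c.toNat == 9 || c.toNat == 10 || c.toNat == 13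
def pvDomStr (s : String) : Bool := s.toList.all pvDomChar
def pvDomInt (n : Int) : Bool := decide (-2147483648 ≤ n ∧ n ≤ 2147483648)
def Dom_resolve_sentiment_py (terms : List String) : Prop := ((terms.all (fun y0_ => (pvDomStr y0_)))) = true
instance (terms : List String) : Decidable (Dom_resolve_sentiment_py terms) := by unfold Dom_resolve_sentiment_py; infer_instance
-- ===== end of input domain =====

-- B builds a frequency table in one pass over the input and then sums lookups over the two
-- fixed vocabularies, instead of scanning the input twice with membership tests (alternative).


-- ===== PORT A =====
-- module-level set constants, as PySem.Set-style distinct-element lists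
def pvPositiveTerms : List String :=
  ["amazing", "authentic", "best", "boost", "breakthrough", "epic", "exciting", "free",
   "genius", "great", "growth", "huge", "impressive", "incredible", "love", "massive",
   "powerful", "smart", "success", "viral", "win", "wow"]

def pvNegativeTerms : List String :=
  ["angry", "awful", "bad", "boring", "broken", "crisis", "difficult", "fail", "hate",
   "hard", "mistake", "pain", "problem", "regret", "risk", "sad", "scared", "stuck",
   "terrible", "wrong"]

def resolve_sentiment_py (terms : List String) : String :=
  let positive_hits : Int := terms.foldl (fun acc term => if pvPositiveTerms.contains term then acc + 1 else acc) 0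
  let negative_hits : Int := terms.foldl (fun acc term => if pvNegativeTerms.contains term then acc + 1 else acc) 0
  if positive_hits > negative_hits then "positive"
  else if negative_hits > positive_hits then "negative"
  else "neutral"

-- ===== PORT B =====
def resolve_sentiment_py_alt (terms : List String) : String :=
  -- counts = {}; for term in terms: counts[term] = counts.get(term, 0) + 1
  let counts : PySem.Dict String Int :=
    terms.foldl (fun d x => d.insert x (d.getD x 0 + 1)) PySem.Dict.empty
  let positive_hits : Int := pvPositiveTerms.foldl (fun acc t => acc + counts.getD t 0) 0
  let negative_hits : Int := pvNegativeTerms.foldl (fun acc t => acc + counts.getD t 0) 0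
  if positive_hits > negative_hits then "positive"
  else if negative_hits > positive_hits then "negative"
  else "neutral"

-- ===== PRECONDITION & SPEC =====
def Spec_resolve_sentiment_py (terms : List String) (out : String) : Prop := out = resolve_sentiment_py_alt terms
instance (terms : List String) (out : String) : Decidable (Spec_resolve_sentiment_py terms out) := by unfold Spec_resolve_sentiment_py; infer_instance

-- ===== CLAIM (what is proved, stated in full; the proofs are below) =====
def Claim_equal_resolve_sentiment_py : Prop := ∀ (terms : List String), Dom_resolve_sentiment_py terms → Spec_resolve_sentiment_py terms (resolve_sentiment_py terms)

-- ===== LEMMAS AND PROOFS =====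

-- folding + g over l starting from c is c plus the sum of the mapped values
theorem pv_foldl_add_eq (g : String → Int) :
    ∀ (l : List String) (c : Int), l.foldl (fun a t => a + g t) c = c + (l.map g).sum := by
  intro l
  induction l with
  | nil => simp
  | cons x xs ih =>
    intro c
    rw [List.foldl_cons, ih, List.map_cons, List.sum_cons]
    ring

-- the counting fold over the input is also a sum of indicator values
theorem pv_foldl_count_eq (V : List String) :
    ∀ (l : List String) (c : Int),
      l.foldl (fun a t => if V.contains t then a + 1 else a) c
        = c + (l.map (fun t => if V.contains t then (1 : Int) else 0)).sum := by
  intro l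
  induction l with
  | nil => simp
  | cons x xs ih =>
    intro c
    rw [List.foldl_cons, ih, List.map_cons, List.sum_cons]
    split_ifs <;> ring

-- summing the indicator of x over a duplicate-free list = 1 if x is in it, else 0
theorem pv_indicator_sum (x : String) :
    ∀ (V : List String), V.Nodup →
      (V.map (fun t => if x = t then (1 : Int) else 0)).sum
        = if V.contains x then (1 : Int) else 0 := by
  intro V
  induction V with
  | nil => intro _; simp
  | cons v vs ihv =>
    intro hV
    obtain ⟨hnot, hvs⟩ := List.nodup_cons.mp hV
    rw [List.map_cons, List.sum_cons, ihv hvs]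
    by_cases hx : x = v
    · subst hx
      simp [hnot]
    · simp [hx]

-- summing counts over a duplicate-free vocabulary = counting input members of the vocabulary
theorem pv_sum_counts (V : List String) (hV : V.Nodup) :
    ∀ (terms : List String),
      (V.map (fun t => (terms.count t : Int))).sum
        = (terms.map (fun t => if V.contains t then (1 : Int) else 0)).sum := by
  intro terms
  induction terms with
  | nil => simp
  | cons x l ih =>
    have step : (V.map (fun t => ((x :: l).count t : Int))).sum
        = (V.map (fun t => (l.count t : Int))).sum
          + (V.map (fun t => if x = t then (1 : Int) else 0)).sum := by
      rw [← List.sum_map_add]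
      refine congrArg List.sum (List.map_congr_left ?_)
      intro t _
      simp [List.count_cons]
    rw [step, ih, pv_indicator_sum x V hV, List.map_cons, List.sum_cons]
    exact add_comm _ _

theorem pvPositiveTerms_nodup : pvPositiveTerms.Nodup := by decide
theorem pvNegativeTerms_nodup : pvNegativeTerms.Nodup := by decide

-- the vocabulary-side fold over B's counter equals A's input-side counting fold
theorem pv_hits_eq (V terms : List String) (hV : V.Nodup) :
    V.foldl (fun acc t => acc +
        (terms.foldl (fun d x => d.insert x (d.getD x 0 + 1))
          (PySem.Dict.empty : PySem.Dict String Int)).getD t 0) 0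
      = terms.foldl (fun acc t => if V.contains t then acc + 1 else acc) 0 := by
  have hfold := PySem.Dict.foldl_insert_getD_add_one_eq_counter terms
  simp only [hfold]
  have h1 : V.foldl (fun acc t => acc + (PySem.Dict.counter terms).getD t 0) 0
      = V.foldl (fun acc t => acc + (terms.count t : Int)) 0 := by
    apply PySem.List.foldl_congr_mem
    intro a t _
    rw [PySem.Dict.getD_counter]
  rw [h1, pv_foldl_add_eq, pv_foldl_count_eq, pv_sum_counts V hV]

-- ===== VERDICT (by name: the statement is the Claim_ definition above) =====
theorem resolve_sentiment_py_spec : Claim_equal_resolve_sentiment_py := by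
  intro terms _
  show resolve_sentiment_py terms = resolve_sentiment_py_alt terms
  simp only [resolve_sentiment_py, resolve_sentiment_py_alt,
    pv_hits_eq pvPositiveTerms terms pvPositiveTerms_nodup,
    pv_hits_eq pvNegativeTerms terms pvNegativeTerms_nodup]
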